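-- pv_equiv track=rewrite | github.com/Deven-14/leetcode | 1937. Maximum Number of Points with Cost/solution.py | cal_right_max
-- ===== SOURCE A (Python) =====
-- def cal_right_max(dp, row, COLS):
--     right_max = [0] * COLS
--     max_idx = COLS-1
--     right_max[COLS-1] = dp[row][max_idx]
--
--     for i in range(COLS-2, -1, -1):
--         t = dp[row][max_idx] - (max_idx - i)
--         if dp[row][i] >= t:
--             max_idx = i
--             right_max[i] = dp[row][i]
--         else:
--             right_max[i] = t
--
--     return right_max
-- ===== SOURCE B (Python) =====
-- def cal_right_max(dp, row, COLS):
--     # Divide and conquer: right_max[i] = i + max_{j>=i}(dp[row][j]-j).  solve works on a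
--     # segment vals = dp[row][base:base+len(vals)]; carry is the max of dp[row][j]-j over
--     # all j to the right of the segment (None if there are none).  The right half is
--     # solved first, its segment max is passed to the left half as its carry.
--     def solve(vals, base, carry):
--         if len(vals) == 1:
--             m = vals[0] - base
--             if carry is not None and carry > m:
--                 m = carry
--             return ([m + base], m)
--         mid = len(vals) // 2
--         out_r, m_r = solve(vals[mid:], base + mid, carry)
--         out_l, m_l = solve(vals[:mid], base, m_r)
--         return (out_l + out_r, m_l)
--     return solve(dp[row][:COLS], 0, None)[0]
-- ===== Notes on version B (the rewrite author's own statement) =====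
-- stated objective: alternative
-- what changed: B replaces A's single backward scan with argmax-index tracking and per-step decay by a recursive divide-and-conquer on the row slice: each half is solved independently, the right half's segment maximum of dp[row][j]-j is passed to the left half as a carry, and the two output halves are concatenated.
import Mathlib
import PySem

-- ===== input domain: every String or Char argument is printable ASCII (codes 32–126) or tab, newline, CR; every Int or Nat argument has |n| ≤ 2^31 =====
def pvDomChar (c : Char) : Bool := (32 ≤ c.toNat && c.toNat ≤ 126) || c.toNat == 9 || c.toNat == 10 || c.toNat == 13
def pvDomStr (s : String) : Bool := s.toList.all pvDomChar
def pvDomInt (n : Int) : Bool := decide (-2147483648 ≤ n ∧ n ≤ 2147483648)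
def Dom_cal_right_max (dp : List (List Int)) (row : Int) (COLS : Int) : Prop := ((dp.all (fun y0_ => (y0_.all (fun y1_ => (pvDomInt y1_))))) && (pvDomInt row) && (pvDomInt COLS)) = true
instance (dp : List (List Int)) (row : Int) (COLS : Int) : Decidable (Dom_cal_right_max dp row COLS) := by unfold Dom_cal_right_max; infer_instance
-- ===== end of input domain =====

-- B replaces A's backward scan with argmax/decay bookkeeping by a recursive divide-and-conquer
-- over the row slice (alternative algorithm, same result; not claimed faster).

-- ===== PORT A =====
-- loop body of A's backward pass, state = (right_max, max_idx)
def pvStepA (r : List Int) (st : List Int × Int) (i : Int) : List Int × Int :=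
  let t := PySem.List.pyGetD r st.2 0 - (st.2 - i)
  if PySem.List.pyGetD r i 0 ≥ t then
    (PySem.List.pySetD st.1 i (PySem.List.pyGetD r i 0), i)
  else
    (PySem.List.pySetD st.1 i t, st.2)

def cal_right_max (dp : List (List Int)) (row : Int) (COLS : Int) : List Int :=
  let r := PySem.List.pyGetD dp row []
  let right_max := List.replicate COLS.toNat (0 : Int)
  let max_idx := COLS - 1
  let right_max := PySem.List.pySetD right_max (COLS - 1) (PySem.List.pyGetD r max_idx 0)
  ((PySem.List.pyRange (COLS - 2) (-1) (-1)).foldl (pvStepA r) (right_max, max_idx)).1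

-- ===== PORT B =====
-- 'm = vals[0] - base; if carry is not None and carry > m: m = carry'
def pvMergeC (x : Int) (carry : Option Int) : Int :=
  match carry with
  | some c => if c > x then c else x
  | none => x

-- B's recursive solve(vals, base, carry); vals[mid:] / vals[:mid] with 0 ≤ mid ≤ len(vals)
-- are exactly List.drop / List.take.  The fuel argument (= len(vals) at the top call) and the
-- 'length ≤ 1' branch only make the recursion total: Python recurses forever on an empty vals
-- (unreachable under Pre_); each recursive call strictly shrinks vals, so the fuel never runs out.
def pvSolve (fuel : Nat) (vals : List Int) (base : Int) (carry : Option Int) : List Int × Int :=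
  match fuel with
  | 0 => ([], 0)
  | fuel + 1 =>
    if vals.length = 1 then
      let m := pvMergeC (PySem.List.pyGetD vals 0 0 - base) carry
      ([m + base], m)
    else if vals.length ≤ 1 then ([], 0)
    else
      let mid := vals.length / 2
      let pr := pvSolve fuel (vals.drop mid) (base + (mid : Int)) carry
      let pl := pvSolve fuel (vals.take mid) base (some pr.2)
      (pl.1 ++ pr.1, pl.2)

def cal_right_max_alt (dp : List (List Int)) (row : Int) (COLS : Int) : List Int :=
  let vals := PySem.List.slice (PySem.List.pyGetD dp row []) none (some COLS)
  (pvSolve vals.length vals 0 none).1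

-- ===== PRECONDITION & SPEC =====
-- Pre_ excludes exactly the inputs where the Python A raises IndexError: COLS ≤ 0 (right_max[COLS-1]),
-- row out of range for dp, or dp[row] shorter than COLS (dp[row][i]).
def Pre_cal_right_max (dp : List (List Int)) (row : Int) (COLS : Int) : Prop :=
  1 ≤ COLS ∧ PySem.Raise.InRange dp.length row ∧ COLS ≤ ((PySem.List.pyGetD dp row []).length : Int)
instance (dp : List (List Int)) (row : Int) (COLS : Int) : Decidable (Pre_cal_right_max dp row COLS) := by unfold Pre_cal_right_max; infer_instance

def pvWitness_cal_right_max : List (List Int) × Int × Int := ([[5, 1, 7], [2, 3, 4]], 1, 3)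

def Spec_cal_right_max (dp : List (List Int)) (row : Int) (COLS : Int) (out : List Int) : Prop := out = cal_right_max_alt dp row COLS
instance (dp : List (List Int)) (row : Int) (COLS : Int) (out : List Int) : Decidable (Spec_cal_right_max dp row COLS out) := by unfold Spec_cal_right_max; infer_instance

-- ===== CLAIM (what is proved, stated in full; the proofs are below) =====
def Claim_equal_cal_right_max : Prop := ∀ (dp : List (List Int)) (row : Int) (COLS : Int), Dom_cal_right_max dp row COLS → Pre_cal_right_max dp row COLS → Spec_cal_right_max dp row COLS (cal_right_max dp row COLS)
-- ===== LEMMAS AND PROOFS =====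

-- Linear reference for B's divide-and-conquer: processing the segment one element at a time.
def pvLin : List Int → Int → Option Int → List Int × Int
  | [], _, _ => ([], 0)
  | [x], base, carry =>
      let m := pvMergeC (x - base) carry
      ([m + base], m)
  | x :: y :: rest, base, carry =>
      let p := pvLin (y :: rest) (base + 1) carry
      let m := pvMergeC (x - base) (some p.2)
      ((m + base) :: p.1, m)

theorem pvLin_append (l r : List Int) (base : Int) (carry : Option Int)
    (hl : l ≠ []) (hr : r ≠ []) :
    pvLin (l ++ r) base carry =
      ((pvLin l base (some (pvLin r (base + l.length) carry).2)).1 ++ (pvLin r (base + l.length) carry).1,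
       (pvLin l base (some (pvLin r (base + l.length) carry).2)).2) := by
  induction l generalizing base with
  | nil => exact absurd rfl hl
  | cons x l ih =>
    obtain ⟨y, t, rfl⟩ := List.exists_cons_of_ne_nil hr
    cases l with
    | nil => simp [pvLin]
    | cons x2 l2 =>
      simp only [List.cons_append, pvLin]
      rw [show (x2 :: (l2 ++ y :: t)) = (x2 :: l2) ++ (y :: t) from rfl,
          ih (base + 1) (by simp)]
      simp only [List.length_cons]
      have hc : (base + 1 + ((x2 :: l2).length : Int)) = base + (((x2 :: l2).length + 1 : Nat) : Int) := by
        push_cast; ring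
      rw [show ((l2.length + 1 + 1 : Nat) : Int) = (((x2 :: l2).length + 1 : Nat) : Int) by simp,
          ← hc]
      simp [List.length_cons] at hc ⊢

theorem pvSolve_eq_pvLin : ∀ (fuel : Nat) (vals : List Int), vals.length ≤ fuel → vals ≠ [] →
    ∀ (base : Int) (carry : Option Int), pvSolve fuel vals base carry = pvLin vals base carry := by
  intro fuel
  induction fuel with
  | zero => intro vals h hne; cases vals <;> simp_all
  | succ k ih =>
    intro vals hlen hne base carry
    by_cases h1 : vals.length = 1
    · obtain ⟨x, rfl⟩ : ∃ x, vals = [x] := by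
        cases vals with
        | nil => simp at h1
        | cons a t => cases t with
          | nil => exact ⟨a, rfl⟩
          | cons b t2 => simp at h1
      simp [pvSolve, pvLin, PySem.List.pyGetD_zero_cons]
    · have h2 : 2 ≤ vals.length := by
        cases vals with
        | nil => exact absurd rfl hne
        | cons a t => cases t with
          | nil => simp at h1
          | cons b t2 => simp
      rw [pvSolve, if_neg h1, if_neg (by omega)]
      dsimp only
      set mid := vals.length / 2 with hmid
      have hmid1 : 1 ≤ mid := by omega
      have hmidlt : mid < vals.length := by omega
      have htake : (vals.take mid).length = mid := by simp; omega
      have hdlen : (vals.drop mid).length = vals.length - mid := by simp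
      have htne : vals.take mid ≠ [] := by
        intro hh; rw [hh] at htake; simp at htake; omega
      have hdne : vals.drop mid ≠ [] := by
        intro hh; rw [hh] at hdlen; simp at hdlen; omega
      rw [ih (vals.drop mid) (by rw [hdlen]; omega) hdne _ carry,
          ih (vals.take mid) (by rw [htake]; omega) htne base _]
      have := pvLin_append (vals.take mid) (vals.drop mid) base carry htne hdne
      rw [List.take_append_drop] at this
      rw [this, htake]

-- writing into a list then reading the suffix
theorem pv_drop_set (xs : List Int) (k : Nat) (v : Int) (h : k < xs.length) :
    (xs.set k v).drop k = v :: xs.drop (k+1) := by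
  rw [List.set_eq_take_append_cons_drop, if_pos h]
  have h2 := @List.drop_left _ (xs.take k) (v :: xs.drop (k+1))
  rwa [List.length_take, min_eq_left (le_of_lt h)] at h2

-- Simulation: A's countdown fold, with state (rm, mi), maintains
--   rm.drop m = (pvLin ((List.take COLS.toNat r).drop m) m none).1  and  r[mi] - mi = (pvLin ((List.take COLS.toNat r).drop m) m none).2
-- where vals = r.take COLS; running it down to 0 yields (pvLin vals 0 none).1.
theorem pv_sim (r : List Int) (COLS : Int) (vals : List Int)
    (hv : vals = List.take COLS.toNat r) (hr : COLS ≤ (r.length : Int))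
    (m : Nat) (rm : List Int) (mi : Int)
    (hm : (m : Int) ≤ COLS - 1) (hlen : rm.length = COLS.toNat)
    (hdrop : rm.drop m = (pvLin ((List.take COLS.toNat r).drop m) (m : Int) none).1)
    (hmi : PySem.List.pyGetD r mi 0 - mi = (pvLin ((List.take COLS.toNat r).drop m) (m : Int) none).2)
    (hmi0 : 0 ≤ mi) (hmiC : mi < COLS) :
    ((PySem.List.pyRange ((m : Int) - 1) (-1) (-1)).foldl (pvStepA r) (rm, mi)).1
      = (pvLin vals 0 none).1 := by
  subst hv
  have hvl : (List.take COLS.toNat r).length = COLS.toNat := by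
    rw [List.length_take]; omega
  induction m generalizing rm mi with
  | zero =>
      rw [PySem.List.pyRange_neg_one_eq_nil (by norm_num)]
      simpa using hdrop
  | succ k ih =>
      have hcons : PySem.List.pyRange ((((k : Nat) + 1 : Nat) : Int) - 1) (-1) (-1)
          = (k : Int) :: PySem.List.pyRange ((k : Int) - 1) (-1) (-1) := by
        rw [show ((((k : Nat) + 1 : Nat) : Int) - 1) = (k : Int) by push_cast; ring]
        exact PySem.List.pyRange_neg_one_cons (by omega)
      have hkC : (k : Int) < COLS - 1 := by
        have : ((k : Nat) + 1 : Int) ≤ COLS - 1 := by exact_mod_cast hm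
        omega
      have hkv : k < (List.take COLS.toNat r).length := by omega
      have hkr : k < r.length := by omega
      -- split the suffix at position k
      have hsplit : (List.take COLS.toNat r).drop k
          = (List.take COLS.toNat r)[k] :: (List.take COLS.toNat r).drop (k+1) :=
        List.drop_eq_getElem_cons hkv
      have hvk : (List.take COLS.toNat r)[k] = r[k] := List.getElem_take
      have hgk : PySem.List.pyGetD r (k : Int) 0 = (List.take COLS.toNat r)[k] := by
        rw [PySem.List.pyGetD_eq_getElem r 0 (by positivity) (by exact_mod_cast hkr)]
        simp [hvk]
      have hne2 : (List.take COLS.toNat r).drop (k+1) ≠ [] := by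
        intro hh
        have := congrArg List.length hh
        simp at this; omega
      obtain ⟨y, t, hyt⟩ := List.exists_cons_of_ne_nil hne2
      -- unfold pvLin at level k
      have hlink : pvLin ((List.take COLS.toNat r).drop k) (k : Int) none =
          ((pvMergeC ((List.take COLS.toNat r)[k] - k) (some (pvLin ((List.take COLS.toNat r).drop (k+1)) ((k : Int) + 1) none).2) + k)
              :: (pvLin ((List.take COLS.toNat r).drop (k+1)) ((k : Int) + 1) none).1,
           pvMergeC ((List.take COLS.toNat r)[k] - k) (some (pvLin ((List.take COLS.toNat r).drop (k+1)) ((k : Int) + 1) none).2)) := by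
        rw [hsplit, hyt]; simp [pvLin]
      set M := (pvLin ((List.take COLS.toNat r).drop (k+1)) ((k : Int) + 1) none).2 with hM
      have hcast : (((k + 1 : Nat)) : Int) = (k : Int) + 1 := by push_cast; ring
      have hmik : PySem.List.pyGetD r mi 0 - mi = M := by
        rw [hmi, hcast]
      have hdropk1 : rm.drop (k+1) = (pvLin ((List.take COLS.toNat r).drop (k+1)) ((k : Int) + 1) none).1 := by
        rw [hdrop, hcast]
      rw [hcons, List.foldl_cons]
      have hklen : k < rm.length := by omega
      by_cases hc : PySem.List.pyGetD r (k : Int) 0 ≥ PySem.List.pyGetD r mi 0 - (mi - (k : Int))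
      · -- new max at k
        have hA : pvStepA r (rm, mi) (k : Int)
            = (rm.set k (PySem.List.pyGetD r (k : Int) 0), (k : Int)) := by
          simp only [pvStepA]
          rw [if_pos hc, PySem.List.pySetD_natCast]
        have hge : M ≤ (List.take COLS.toNat r)[k] - k := by
          have : PySem.List.pyGetD r mi 0 - (mi - (k : Int)) = M + k := by rw [← hmik]; ring
          rw [this, hgk] at hc; omega
        have hmerge : pvMergeC ((List.take COLS.toNat r)[k] - (k : Int)) (some M) = (List.take COLS.toNat r)[k] - k := by
          simp only [pvMergeC]; rw [if_neg (by omega)]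
        rw [hA]
        exact ih _ _ (by omega) (by simpa using hlen)
          (by rw [pv_drop_set rm k _ hklen, hlink, hmerge, hdropk1, hgk]; congr 1; ring)
          (by rw [hlink, hmerge]; simp [hgk]) (by positivity) (by omega)
      · -- old max stays
        have hA : pvStepA r (rm, mi) (k : Int)
            = (rm.set k (PySem.List.pyGetD r mi 0 - (mi - (k : Int))), mi) := by
          simp only [pvStepA]
          rw [if_neg hc, PySem.List.pySetD_natCast]
        have hlt : (List.take COLS.toNat r)[k] - k < M := by
          have : PySem.List.pyGetD r mi 0 - (mi - (k : Int)) = M + k := by rw [← hmik]; ring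
          rw [this, hgk] at hc; omega
        have hmerge : pvMergeC ((List.take COLS.toNat r)[k] - (k : Int)) (some M) = M := by
          simp only [pvMergeC]; rw [if_pos (by omega)]
        have ht : PySem.List.pyGetD r mi 0 - (mi - (k : Int)) = M + k := by rw [← hmik]; ring
        rw [hA]
        exact ih _ _ (by omega) (by simpa using hlen)
          (by rw [pv_drop_set rm k _ hklen, hlink, hmerge, hdropk1, ht])
          (by rw [hlink, hmerge, hmik]) hmi0 hmiC

-- ===== VERDICT (by name: the statement is the Claim_ definition above) =====
theorem cal_right_max_spec : Claim_equal_cal_right_max := by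
  intro dp row COLS _ hpre
  obtain ⟨hC, _, hr⟩ := hpre
  unfold Spec_cal_right_max cal_right_max cal_right_max_alt
  dsimp only
  set r := PySem.List.pyGetD dp row [] with hrdef
  have hslice : PySem.List.slice r none (some COLS) = List.take COLS.toNat r :=
    PySem.List.slice_to r (show (0:Int) ≤ COLS by omega)
  have hvl : (List.take COLS.toNat r).length = COLS.toNat := by
    rw [List.length_take]; omega
  rw [hslice, hvl, pvSolve_eq_pvLin COLS.toNat (List.take COLS.toNat r) (le_of_eq hvl)
        (by intro hh; rw [hh] at hvl; simp at hvl; omega) 0 none]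
  have hm : ((COLS - 1).toNat : Int) = COLS - 1 := by omega
  have hlast : (COLS - 1).toNat < (List.take COLS.toNat r).length := by rw [hvl]; omega
  have hvlast : (List.take COLS.toNat r)[(COLS - 1).toNat] = r[(COLS - 1).toNat]'(by omega) :=
    List.getElem_take
  have hdrop1 : (List.take COLS.toNat r).drop ((COLS - 1).toNat + 1) = [] :=
    List.drop_eq_nil_of_le (by rw [hvl]; omega)
  have hsuffix : (List.take COLS.toNat r).drop (COLS - 1).toNat
      = [(List.take COLS.toNat r)[(COLS - 1).toNat]] := by
    rw [List.drop_eq_getElem_cons hlast, hdrop1]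
  have hglast : PySem.List.pyGetD r (COLS - 1) 0 = (List.take COLS.toNat r)[(COLS - 1).toNat] := by
    rw [PySem.List.pyGetD_eq_getElem r 0 (by omega) (by omega)]
    exact hvlast.symm
  have hset : PySem.List.pySetD (List.replicate COLS.toNat (0 : Int)) (COLS - 1) (PySem.List.pyGetD r (COLS - 1) 0)
      = (List.replicate COLS.toNat (0 : Int)).set (COLS - 1).toNat (PySem.List.pyGetD r (COLS - 1) 0) :=
    PySem.List.pySetD_of_nonneg _ _ (by omega)
  rw [hset]
  have hpvlin : pvLin ((List.take COLS.toNat r).drop (COLS - 1).toNat) (((COLS - 1).toNat : Int)) none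
      = ([(List.take COLS.toNat r)[(COLS - 1).toNat]],
         (List.take COLS.toNat r)[(COLS - 1).toNat] - ((COLS - 1).toNat : Int)) := by
    rw [hsuffix]; simp [pvLin, pvMergeC]
  have := pv_sim r COLS (List.take COLS.toNat r) rfl hr (COLS - 1).toNat
    ((List.replicate COLS.toNat (0 : Int)).set (COLS - 1).toNat (PySem.List.pyGetD r (COLS - 1) 0))
    (COLS - 1)
    (by omega) (by simp)
    (by rw [pv_drop_set _ _ _ (by simp; omega), hpvlin]
        have h0 : (List.replicate COLS.toNat (0 : Int)).drop ((COLS - 1).toNat + 1) = [] := by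
          apply List.drop_eq_nil_of_le; simp; omega
        rw [h0, hglast])
    (by rw [hpvlin, hglast, hm])
    (by omega) (by omega)
  rw [hm, show COLS - 1 - 1 = COLS - 2 by ring] at this
  exact this
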